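-- pv_equiv track=rewrite | github.com/KaliBond/wintermute | iran_phase_transition_analysis.py | _are_aligned_institutions
-- ===== SOURCE A (Python) =====
-- def _are_aligned_institutions(i, j):
--     """Check if two institutions are naturally aligned during crisis"""
--     # Iran-specific institutional alignments during crisis
--     aligned_groups = [
--         [0, 1, 3],  # Supreme Leader, IRGC, Clergy (power center)
--         [4, 5],     # Bureaucracy, Bazaar (administrative/economic)
--         [6, 7]      # Urban/Rural populations (civil society)
--     ]
--
--     for group in aligned_groups:
--         if i in group and j in group:
--             return True
--     return False
-- ===== SOURCE B (Python) =====
-- # The whole symmetric "aligned" relation on the 8x8 index grid, materialised as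
-- # one 64-bit integer: bit (i*8 + j) is set iff institutions i and j share a group.
-- _ALIGNED_PAIRS = 0xC0C030300B000B0B
--
-- def _are_aligned_institutions(i, j):
--     """Check if two institutions are naturally aligned during crisis"""
--     return 0 <= i < 8 and 0 <= j < 8 and (_ALIGNED_PAIRS >> (i * 8 + j)) & 1 == 1
-- ===== Notes on version B (the rewrite author's own statement) =====
-- stated objective: alternative
-- what changed: Instead of scanning group lists (or looking up group ids), the full pairwise aligned relation is flattened into a single 64-bit bitmask; B range-checks the indices and tests one bit at position i*8+j, with no groups, loop or lookup at all.
import Mathlib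
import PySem

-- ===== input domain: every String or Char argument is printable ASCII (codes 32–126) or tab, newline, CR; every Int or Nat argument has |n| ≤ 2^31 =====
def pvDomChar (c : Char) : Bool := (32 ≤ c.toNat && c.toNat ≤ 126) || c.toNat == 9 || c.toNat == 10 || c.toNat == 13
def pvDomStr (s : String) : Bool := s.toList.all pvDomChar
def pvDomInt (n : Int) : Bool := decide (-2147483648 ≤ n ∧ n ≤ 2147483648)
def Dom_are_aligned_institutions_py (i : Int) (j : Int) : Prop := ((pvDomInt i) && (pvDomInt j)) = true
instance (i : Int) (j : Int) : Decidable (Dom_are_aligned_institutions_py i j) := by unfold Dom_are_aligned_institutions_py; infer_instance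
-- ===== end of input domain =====

-- ===== PORT A =====
-- B flattens the pairwise aligned relation into one 64-bit bitmask tested at bit i*8+j (alternative; no groups, loop or lookup).
-- the hardcoded aligned_groups literal
def pvAlignedGroups : List (List Int) := [[0, 1, 3], [4, 5], [6, 7]]

-- the 'for group in aligned_groups: if i in group and j in group: return True' loop, with early return
def pvLoopA (groups : List (List Int)) (i : Int) (j : Int) : Bool :=
  match groups with
  | [] => false
  | g :: rest => if g.contains i && g.contains j then true else pvLoopA rest i j

def are_aligned_institutions_py (i : Int) (j : Int) : Bool :=
  pvLoopA pvAlignedGroups i j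

-- ===== PORT B =====
-- the module-level bitmask literal _ALIGNED_PAIRS
def pvAlignedPairs : Nat := 0xC0C030300B000B0B

-- return 0 <= i < 8 and 0 <= j < 8 and (_ALIGNED_PAIRS >> (i*8+j)) & 1 == 1
-- (the range guards make i*8+j a nonnegative int, so the .toNat conversion for the shift is exact)
def are_aligned_institutions_py_alt (i : Int) (j : Int) : Bool :=
  decide (0 ≤ i) && decide (i < 8) && decide (0 ≤ j) && decide (j < 8) &&
    ((pvAlignedPairs >>> (i * 8 + j).toNat) &&& 1 == 1)

-- ===== PRECONDITION & SPEC =====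
def Spec_are_aligned_institutions_py (i : Int) (j : Int) (out : Bool) : Prop := out = are_aligned_institutions_py_alt i j
instance (i : Int) (j : Int) (out : Bool) : Decidable (Spec_are_aligned_institutions_py i j out) := by unfold Spec_are_aligned_institutions_py; infer_instance

-- ===== CLAIM (what is proved, stated in full; the proofs are below) =====
def Claim_equal_are_aligned_institutions_py : Prop := ∀ (i : Int) (j : Int), Dom_are_aligned_institutions_py i j → Spec_are_aligned_institutions_py i j (are_aligned_institutions_py i j)

-- ===== LEMMAS AND PROOFS =====

-- outside the 0..7 range on either side, A's scan finds the index in no group, and B's guard fails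
theorem pv_outside (i j : Int) (h : ¬(0 ≤ i ∧ i < 8 ∧ 0 ≤ j ∧ j < 8)) :
    are_aligned_institutions_py i j = false ∧ are_aligned_institutions_py_alt i j = false := by
  rcases (by omega : (i < 0 ∨ 8 ≤ i) ∨ (j < 0 ∨ 8 ≤ j)) with hi | hj
  · have h0 : i ≠ 0 := by omega
    have h1 : i ≠ 1 := by omega
    have h3 : i ≠ 3 := by omega
    have h4 : i ≠ 4 := by omega
    have h5 : i ≠ 5 := by omega
    have h6 : i ≠ 6 := by omega
    have h7 : i ≠ 7 := by omega
    constructor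
    · show pvLoopA pvAlignedGroups i j = false
      simp [pvAlignedGroups, pvLoopA, h0, h1, h3, h4, h5, h6, h7]
    · unfold are_aligned_institutions_py_alt
      rcases (by omega : ¬ 0 ≤ i ∨ ¬ i < 8) with h' | h' <;> simp [h']
  · have h0 : j ≠ 0 := by omega
    have h1 : j ≠ 1 := by omega
    have h3 : j ≠ 3 := by omega
    have h4 : j ≠ 4 := by omega
    have h5 : j ≠ 5 := by omega
    have h6 : j ≠ 6 := by omega
    have h7 : j ≠ 7 := by omega
    constructor
    · show pvLoopA pvAlignedGroups i j = false
      simp [pvAlignedGroups, pvLoopA, h0, h1, h3, h4, h5, h6, h7]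
    · unfold are_aligned_institutions_py_alt
      rcases (by omega : ¬ 0 ≤ j ∨ ¬ j < 8) with h' | h' <;> simp [h']

-- ===== VERDICT (by name: the statement is the Claim_ definition above) =====
theorem are_aligned_institutions_py_spec : Claim_equal_are_aligned_institutions_py := by
  intro i j _
  show are_aligned_institutions_py i j = are_aligned_institutions_py_alt i j
  by_cases h : 0 ≤ i ∧ i < 8 ∧ 0 ≤ j ∧ j < 8
  · obtain ⟨h1, h2, h3, h4⟩ := h
    interval_cases i <;> interval_cases j <;> decide
  · obtain ⟨ha, hb⟩ := pv_outside i j h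
    rw [ha, hb]
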